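-- pv_equiv track=rewrite | github.com/IBM/oper8 | oper8/deploy_manager/dry_run_deploy_manager.py | _split_selectors
-- ===== SOURCE A (Python) =====
-- def _split_selectors(selector=""):
--     """Split up selectors by , but ignoring those surrounded by () e.g.
--     'app,app in (frontend, backend)' becomes ['app','app in (frontend, backend)']
--     """
--     output_list = []
--     current_selector = ""
--     in_paren = False
--
--     # Loop through selector character by character
--     for char in selector:
--         # If we've reached a comma not while in parentheses then append to output
--         # and start anew
--         if char == "," and not in_paren:
--             output_list.append(current_selector)
--             current_selector = ""
--             continue
--
--         # If detect paren then update in_paren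
--         if char == "(" and not in_paren:
--             in_paren = True
--         elif char == ")" and in_paren:
--             in_paren = False
--
--         # Append the current char
--         current_selector += char
--
--     # If current selector is not empty then add it to the output list
--     if current_selector:
--         output_list.append(current_selector)
--
--     return output_list
-- ===== SOURCE B (Python) =====
-- def _split_selectors(selector=""):
--     # Two-pass: record the indices of top-level commas, then slice the
--     # original string between consecutive cut points.
--     cuts = []
--     in_paren = False
--     for i, char in enumerate(selector):
--         if in_paren:
--             if char == ")":
--                 in_paren = False
--         elif char == ",":
--             cuts.append(i)
--         elif char == "(":
--             in_paren = True
--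
--     segments = []
--     start = 0
--     for cut in cuts:
--         segments.append(selector[start:cut])
--         start = cut + 1
--     segments.append(selector[start:])
--
--     # drop the trailing segment iff it is empty (A's `if current_selector`)
--     if segments[-1] == "":
--         segments.pop()
--     return segments
-- ===== Notes on version B (the rewrite author's own statement) =====
-- stated objective: alternative
-- what changed: Replaces the single accumulate-characters state machine with two passes: one scan that only records the indices of top-level commas, then a slicing pass that cuts the original string between consecutive cut points, dropping the trailing segment iff empty.
import Mathlib
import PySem

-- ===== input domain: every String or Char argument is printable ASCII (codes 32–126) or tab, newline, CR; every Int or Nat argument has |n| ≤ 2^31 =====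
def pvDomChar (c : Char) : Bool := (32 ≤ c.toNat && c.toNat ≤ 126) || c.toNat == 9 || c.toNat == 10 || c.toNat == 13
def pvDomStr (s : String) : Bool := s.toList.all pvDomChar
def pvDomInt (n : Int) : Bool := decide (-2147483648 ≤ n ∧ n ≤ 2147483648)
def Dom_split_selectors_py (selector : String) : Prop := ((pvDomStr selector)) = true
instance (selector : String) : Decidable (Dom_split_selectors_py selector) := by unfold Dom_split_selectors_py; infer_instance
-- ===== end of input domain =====

-- B replaces A's accumulate-a-segment state machine by two passes (record the
-- indices of top-level commas, then slice the original string between them);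
-- same cost, different structure (objective: alternative).

-- ===== PORT A =====
-- one iteration of A's character loop; state = (output_list, current_selector as chars, in_paren)
def pvAStep (st : List String × List Char × Bool) (c : Char) : List String × List Char × Bool :=
  if c = ',' ∧ st.2.2 = false then
    (st.1 ++ [String.ofList st.2.1], [], st.2.2)
  else
    (st.1, st.2.1 ++ [c],
      if c = '(' ∧ st.2.2 = false then true
      else if c = ')' ∧ st.2.2 = true then false
      else st.2.2)

def split_selectors_py (selector : String) : List String :=
  let st := selector.toList.foldl pvAStep ([], [], false)
  if st.2.1 ≠ [] then st.1 ++ [String.ofList st.2.1] else st.1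

-- ===== PORT B =====
-- first pass: collect indices of commas seen while not in_paren (Source B's enumerate loop)
def pvBCutStep (st : List Nat × Bool) (p : Char × Nat) : List Nat × Bool :=
  if st.2 then (if p.1 = ')' then (st.1, false) else st)
  else if p.1 = ',' then (st.1 ++ [p.2], st.2)
  else if p.1 = '(' then (st.1, true)
  else st

-- second pass: selector[start:cut]; (drop start).take (cut-start) is exact here
-- because 0 ≤ start ≤ cut ≤ length along B's run
def pvBSliceStep (cs : List Char) (st : List String × Nat) (cut : Nat) : List String × Nat :=
  (st.1 ++ [String.ofList ((cs.drop st.2).take (cut - st.2))], cut + 1)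

def split_selectors_py_alt (selector : String) : List String :=
  let cs := selector.toList
  let cuts := (cs.zipIdx.foldl pvBCutStep ([], false)).1
  let r := cuts.foldl (pvBSliceStep cs) ([], 0)
  let segs := r.1 ++ [String.ofList (cs.drop r.2)]
  if segs.getLast? = some "" then segs.dropLast else segs

-- ===== PRECONDITION & SPEC =====
def Spec_split_selectors_py (selector : String) (out : List String) : Prop := out = split_selectors_py_alt selector
instance (selector : String) (out : List String) : Decidable (Spec_split_selectors_py selector out) := by unfold Spec_split_selectors_py; infer_instance

-- ===== CLAIM (what is proved, stated in full; the proofs are below) =====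
def Claim_equal_split_selectors_py : Prop := ∀ (selector : String), Dom_split_selectors_py selector → Spec_split_selectors_py selector (split_selectors_py selector)

-- ===== LEMMAS AND PROOFS =====

-- the in_paren update both programs perform on a non-top-level-comma character
def pvNext (c : Char) (inp : Bool) : Bool :=
  if c = '(' ∧ inp = false then true
  else if c = ')' ∧ inp = true then false
  else inp

-- prepend chars onto the first segment
def pvConsHead (a : List Char) : List (List Char) → List (List Char)
  | [] => [a]
  | s :: ss => (a ++ s) :: ss

-- reference splitting: the list of raw segments (always nonempty, trailing one may be [])
def pvSegs : List Char → Bool → List (List Char)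
  | [], _ => [[]]
  | c :: rest, inp =>
    if c = ',' ∧ inp = false then [] :: pvSegs rest inp
    else pvConsHead [c] (pvSegs rest (pvNext c inp))

-- reference cut positions, relative to the scanned suffix
def pvCuts : List Char → Bool → List Nat
  | [], _ => []
  | c :: rest, inp =>
    if c = ',' ∧ inp = false then 0 :: (pvCuts rest inp).map (· + 1)
    else (pvCuts rest (pvNext c inp)).map (· + 1)

def pvLast : List (List Char) → List Char
  | [] => []
  | [s] => s
  | _ :: s :: ss => pvLast (s :: ss)

theorem pvSegs_ne_nil (cs : List Char) (inp : Bool) : pvSegs cs inp ≠ [] := by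
  cases cs with
  | nil => simp [pvSegs]
  | cons c rest =>
    simp only [pvSegs]
    split
    · simp
    · cases pvSegs rest (pvNext c inp) <;> simp [pvConsHead]

theorem pvSegs_cons (cs : List Char) (inp : Bool) :
    ∃ s ss, pvSegs cs inp = s :: ss := by
  cases h : pvSegs cs inp with
  | nil => exact absurd h (pvSegs_ne_nil _ _)
  | cons s ss => exact ⟨s, ss, rfl⟩

theorem pvLast_cons_cons (s t : List Char) (ss : List (List Char)) :
    pvLast (s :: t :: ss) = pvLast (t :: ss) := by
  simp [pvLast]

theorem pvConsHead_consHead (a b : List Char) (L : List (List Char)) :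
    pvConsHead a (pvConsHead b L) = pvConsHead (a ++ b) L := by
  cases L <;> simp [pvConsHead, List.append_assoc]

theorem pvConsHead_nil (L : List (List Char)) (h : L ≠ []) : pvConsHead [] L = L := by
  cases L with
  | nil => exact absurd rfl h
  | cons s ss => simp [pvConsHead]

theorem pvOfList_inj (l l' : List Char) (h : String.ofList l = String.ofList l') : l = l' := by
  have := congrArg String.toList h; simpa using this

-- A's loop computed by the reference segments
theorem pvA_loop (cs : List Char) : ∀ (inp : Bool) (out : List String) (cur : List Char),
    ∃ b, cs.foldl pvAStep (out, cur, inp) =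
      (out ++ ((pvConsHead cur (pvSegs cs inp)).dropLast).map String.ofList,
       pvLast (pvConsHead cur (pvSegs cs inp)), b) := by
  induction cs with
  | nil =>
    intro inp out cur
    exact ⟨inp, by simp [pvSegs, pvConsHead, pvLast]⟩
  | cons c rest ih =>
    intro inp out cur
    simp only [List.foldl_cons, pvAStep]
    by_cases hc : c = ',' ∧ inp = false
    · obtain ⟨hc1, hc2⟩ := hc
      subst hc2
      obtain ⟨b, hb⟩ := ih false (out ++ [String.ofList cur]) []
      refine ⟨b, ?_⟩
      rw [if_pos (by simp [hc1]), hb]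
      obtain ⟨s, ss, hss⟩ := pvSegs_cons rest false
      have hsegs : pvSegs (c :: rest) false = [] :: pvSegs rest false := by
        rw [pvSegs, if_pos ⟨hc1, rfl⟩]
      rw [hsegs, hss]
      simp [pvConsHead, pvLast_cons_cons, List.append_assoc, List.dropLast_cons₂]
    · rw [if_neg (by simpa using hc)]
      obtain ⟨b, hb⟩ := ih (pvNext c inp) out (cur ++ [c])
      refine ⟨b, ?_⟩
      have hstep : (if c = '(' ∧ inp = false then true
          else if c = ')' ∧ inp = true then false else inp) = pvNext c inp := by
        simp [pvNext]
      rw [hstep, hb]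
      have h1 : pvSegs (c :: rest) inp = pvConsHead [c] (pvSegs rest (pvNext c inp)) := by
        simp only [pvSegs]; rw [if_neg hc]
      rw [h1, pvConsHead_consHead]

-- A characterised
theorem pvA_eq (selector : String) :
    split_selectors_py selector =
      ((pvSegs selector.toList false).dropLast).map String.ofList ++
        (if pvLast (pvSegs selector.toList false) ≠ [] then
          [String.ofList (pvLast (pvSegs selector.toList false))] else []) := by
  obtain ⟨b, hb⟩ := pvA_loop selector.toList false [] []
  have hch : pvConsHead [] (pvSegs selector.toList false) = pvSegs selector.toList false :=
    pvConsHead_nil _ (pvSegs_ne_nil _ _)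
  rw [hch] at hb
  simp only [split_selectors_py, hb]
  split <;> simp_all

-- B's first pass computed by the reference cuts
theorem pvB_cuts (cs : List Char) : ∀ (n : Nat) (acc : List Nat) (inp : Bool),
    ∃ b, (cs.zipIdx n).foldl pvBCutStep (acc, inp) =
      (acc ++ (pvCuts cs inp).map (· + n), b) := by
  induction cs with
  | nil => intro n acc inp; exact ⟨inp, by simp [pvCuts]⟩
  | cons c rest ih =>
    intro n acc inp
    rw [List.zipIdx_cons, List.foldl_cons]
    cases inp with
    | false =>
      by_cases hc : c = ','
      · have hstep : pvBCutStep (acc, false) (c, n) = (acc ++ [n], false) := by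
          simp [pvBCutStep, hc]
        obtain ⟨b, hb⟩ := ih (n + 1) (acc ++ [n]) false
        refine ⟨b, ?_⟩
        rw [hstep, hb]
        have hcuts : pvCuts (c :: rest) false = 0 :: (pvCuts rest false).map (· + 1) := by
          rw [pvCuts, if_pos ⟨hc, rfl⟩]
        rw [hcuts]
        simp [List.map_map, Function.comp, List.append_assoc,
          Nat.add_comm, Nat.add_left_comm]
      · have hcuts : pvCuts (c :: rest) false = (pvCuts rest (pvNext c false)).map (· + 1) := by
          rw [pvCuts, if_neg (by simp [hc])]
        by_cases hp : c = '('
        · have hstep : pvBCutStep (acc, false) (c, n) = (acc, true) := by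
            simp [pvBCutStep, hp]
          have hnx : pvNext c false = true := by simp [pvNext, hp]
          obtain ⟨b, hb⟩ := ih (n + 1) acc true
          refine ⟨b, ?_⟩
          rw [hstep, hb, hcuts, hnx]
          simp [List.map_map, Function.comp, Nat.add_comm, Nat.add_left_comm]
        · have hstep : pvBCutStep (acc, false) (c, n) = (acc, false) := by
            simp [pvBCutStep, hc, hp]
          have hnx : pvNext c false = false := by simp [pvNext, hp]
          obtain ⟨b, hb⟩ := ih (n + 1) acc false
          refine ⟨b, ?_⟩
          rw [hstep, hb, hcuts, hnx]
          simp [List.map_map, Function.comp, Nat.add_comm, Nat.add_left_comm]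
    | true =>
      have hcuts : pvCuts (c :: rest) true = (pvCuts rest (pvNext c true)).map (· + 1) := by
        rw [pvCuts, if_neg (by simp)]
      by_cases hp : c = ')'
      · have hstep : pvBCutStep (acc, true) (c, n) = (acc, false) := by
          simp [pvBCutStep, hp]
        have hnx : pvNext c true = false := by simp [pvNext, hp]
        obtain ⟨b, hb⟩ := ih (n + 1) acc false
        refine ⟨b, ?_⟩
        rw [hstep, hb, hcuts, hnx]
        simp [List.map_map, Function.comp, Nat.add_comm, Nat.add_left_comm]
      · have hstep : pvBCutStep (acc, true) (c, n) = (acc, true) := by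
          simp [pvBCutStep, hp]
        have hnx : pvNext c true = true := by simp [pvNext, hp]
        obtain ⟨b, hb⟩ := ih (n + 1) acc true
        refine ⟨b, ?_⟩
        rw [hstep, hb, hcuts, hnx]
        simp [List.map_map, Function.comp, Nat.add_comm, Nat.add_left_comm]

-- the slice fold is linear in its accumulator
theorem pvSlice_acc (full : List Char) (ks : List Nat) :
    ∀ (a b : List String) (i : Nat),
      ks.foldl (pvBSliceStep full) (a ++ b, i) =
        (a ++ (ks.foldl (pvBSliceStep full) (b, i)).1, (ks.foldl (pvBSliceStep full) (b, i)).2) := by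
  induction ks with
  | nil => intro a b i; simp
  | cons k ks ih =>
    intro a b i
    simp only [List.foldl_cons, pvBSliceStep, List.append_assoc]
    exact ih a _ (k + 1)

-- no top-level comma → the whole suffix is the single segment
theorem pvCuts_nil (cs : List Char) : ∀ inp, pvCuts cs inp = [] → pvSegs cs inp = [cs] := by
  induction cs with
  | nil => intro inp _; rfl
  | cons c rest ih =>
    intro inp h
    by_cases hc : c = ',' ∧ inp = false
    · rw [pvCuts, if_pos hc] at h; simp at h
    · rw [pvCuts, if_neg hc] at h
      simp only [List.map_eq_nil_iff] at h
      rw [pvSegs, if_neg hc, ih _ h]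
      rfl

-- B's second pass reconstructs the reference segments
theorem pvB_slices (cs : List Char) : ∀ (inp : Bool) (full : List Char) (i : Nat) (acc : List String),
    full.drop i = cs →
    (((pvCuts cs inp).map (· + i)).foldl (pvBSliceStep full) (acc, i)).1 ++
        [String.ofList (full.drop (((pvCuts cs inp).map (· + i)).foldl (pvBSliceStep full) (acc, i)).2)]
      = acc ++ (pvSegs cs inp).map String.ofList := by
  induction cs with
  | nil =>
    intro inp full i acc hfull
    simp [pvCuts, pvSegs, hfull]
  | cons c rest ih =>
    intro inp full i acc hfull
    have hdrop : full.drop (i + 1) = rest := by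
      rw [← List.tail_drop, hfull]
      rfl
    by_cases hc : c = ',' ∧ inp = false
    · have hcuts : pvCuts (c :: rest) inp = 0 :: (pvCuts rest inp).map (· + 1) := by
        rw [pvCuts, if_pos hc]
      have hsegs : pvSegs (c :: rest) inp = [] :: pvSegs rest inp := by
        rw [pvSegs, if_pos hc]
      have hmm : (((pvCuts rest inp).map (· + 1)).map (· + i)) = (pvCuts rest inp).map (· + (i + 1)) := by
        simp [List.map_map, Function.comp, Nat.add_comm, Nat.add_left_comm]
      have h1 := ih inp full (i + 1) (acc ++ [String.ofList []]) hdrop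
      simp only [hcuts, List.map_cons, List.foldl_cons, pvBSliceStep,
        Nat.sub_self, List.take_zero, Nat.zero_add, hmm]
      rw [h1]
      simp [hsegs]
    · have hcuts : pvCuts (c :: rest) inp = (pvCuts rest (pvNext c inp)).map (· + 1) := by
        rw [pvCuts, if_neg hc]
      have hsegs : pvSegs (c :: rest) inp = pvConsHead [c] (pvSegs rest (pvNext c inp)) := by
        rw [pvSegs, if_neg hc]
      obtain ⟨s, ss, hss⟩ := pvSegs_cons rest (pvNext c inp)
      cases hks : pvCuts rest (pvNext c inp) with
      | nil =>
        have hone : pvSegs rest (pvNext c inp) = [rest] := pvCuts_nil rest _ hks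
        simp [hcuts, hks, hsegs, hone, pvConsHead, hfull]
      | cons k ks =>
        have hmm : ((pvCuts rest (pvNext c inp)).map (· + 1)).map (· + i) =
            (k + (i + 1)) :: ks.map (· + (i + 1)) := by
          rw [hks]
          simp [List.map_map, Function.comp, Nat.add_comm, Nat.add_left_comm]
        -- the inductive hypothesis at offset i+1 with empty accumulator
        have h1 := ih (pvNext c inp) full (i + 1) [] hdrop
        rw [hks] at h1
        have hmm2 : ((k :: ks).map (· + (i + 1))) = (k + (i + 1)) :: ks.map (· + (i + 1)) := by
          simp
        rw [hmm2] at h1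
        -- expand the first step of the IH fold
        have hstep1 : pvBSliceStep full (([] : List String), i + 1) (k + (i + 1)) =
            ([String.ofList (rest.take k)], k + (i + 1) + 1) := by
          simp [pvBSliceStep, hdrop]
        rw [List.foldl_cons, hstep1] at h1
        -- expand the first step of the goal fold
        have htake : (full.drop i).take (k + (i + 1) - i) = c :: rest.take k := by
          rw [hfull]
          have : k + (i + 1) - i = k + 1 := by omega
          rw [this, List.take_succ_cons]
        rw [hcuts, hmm, List.foldl_cons]
        have hstep2 : pvBSliceStep full (acc, i) (k + (i + 1)) =
            (acc ++ [String.ofList (c :: rest.take k)], k + (i + 1) + 1) := by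
          simp [pvBSliceStep, htake]
        rw [hstep2]
        -- factor both folds through the accumulator lemma
        have hG1 := pvSlice_acc full (ks.map (· + (i + 1)))
          (acc ++ [String.ofList (c :: rest.take k)]) [] (k + (i + 1) + 1)
        have hG2 := pvSlice_acc full (ks.map (· + (i + 1)))
          [String.ofList (rest.take k)] [] (k + (i + 1) + 1)
        simp only [List.append_nil] at hG1 hG2
        rw [hG2] at h1
        rw [hG1]
        -- compare with the reference segments
        rw [hsegs, hss, pvConsHead]
        rw [hss, List.map_cons] at h1
        simp only [List.cons_append, List.nil_append, List.map_cons] at h1 ⊢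
        have hhead : String.ofList (rest.take k) = String.ofList s := (List.cons_eq_cons.mp h1).1
        have htail := (List.cons_eq_cons.mp h1).2
        have hs : rest.take k = s := pvOfList_inj _ _ hhead
        rw [List.append_assoc (acc ++ [String.ofList (c :: List.take k rest)]), htail, hs]
        simp

-- B characterised
theorem pvB_eq (selector : String) :
    split_selectors_py_alt selector =
      (if ((pvSegs selector.toList false).map String.ofList).getLast? = some "" then
        ((pvSegs selector.toList false).map String.ofList).dropLast
      else (pvSegs selector.toList false).map String.ofList) := by
  unfold split_selectors_py_alt
  obtain ⟨b, hb⟩ := pvB_cuts selector.toList 0 [] false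
  simp only [hb, List.nil_append]
  have hz : (pvCuts selector.toList false).map (· + 0) = (pvCuts selector.toList false).map (· + (0 : Nat)) := rfl
  have hsl := pvB_slices selector.toList false selector.toList 0 [] (by simp)
  simp only [List.nil_append] at hsl
  rw [hsl]

theorem pvLast_getLast? (L : List (List Char)) (h : L ≠ []) : L.getLast? = some (pvLast L) := by
  induction L with
  | nil => exact absurd rfl h
  | cons s ss ih =>
    cases ss with
    | nil => rfl
    | cons t ts => rw [List.getLast?_cons_cons, ih (by simp), pvLast_cons_cons]

theorem pvDropLast_last (L : List (List Char)) (h : L ≠ []) :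
    L.dropLast ++ [pvLast L] = L := by
  induction L with
  | nil => exact absurd rfl h
  | cons s ss ih =>
    cases ss with
    | nil => rfl
    | cons t ts =>
      rw [List.dropLast_cons₂, pvLast_cons_cons, List.cons_append, ih (by simp)]

-- ===== VERDICT (by name: the statement is the Claim_ definition above) =====
theorem split_selectors_py_spec : Claim_equal_split_selectors_py := by
  intro selector _
  unfold Spec_split_selectors_py
  rw [pvA_eq, pvB_eq]
  set L := pvSegs selector.toList false with hL
  have hne : L ≠ [] := pvSegs_ne_nil _ _
  have hlast : (L.map String.ofList).getLast? = some (String.ofList (pvLast L)) := by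
    rw [List.getLast?_map, pvLast_getLast? L hne]; rfl
  rw [hlast]
  by_cases hz : pvLast L = []
  · rw [if_neg (by simpa using hz), if_pos (by rw [hz])]
    simp [List.map_dropLast]
  · rw [if_pos (by simpa using hz),
      if_neg (by simp [hz])]
    conv_rhs => rw [← pvDropLast_last L hne]
    simp [List.map_dropLast]
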